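-- pv_equiv track=rewrite | github.com/micwill755/qkllm | interview/min_batch_size.py | findMinBatchSize
-- ===== SOURCE A (Python) =====
-- import math
--
-- def findMinBatchSize(dataSamples: list[int], maxBatches: int):
--     left, right = 1, max(dataSamples)
--     iterations = 0
--     while left < right:
--         mid = (left + right) // 2
--         total = sum(math.ceil(sample / mid) for sample in dataSamples)
--         if total <= maxBatches:
--             right = mid
--         else:
--             left = mid + 1
--         iterations += 1
--
--     return left
-- ===== SOURCE B (Python) =====
-- import math
--
-- def findMinBatchSize(dataSamples: list[int], maxBatches: int):
--     m = max(dataSamples)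
--     total_items = sum(dataSamples)
--     mid = 1
--     while mid < m and sum(math.ceil(sample / mid) for sample in dataSamples) > maxBatches:
--         # the batch total stays the same until the first size where some
--         # ceil(sample/size) drops, so jump straight to that size
--         nxt = m
--         for sample in dataSamples:
--             q = math.ceil(sample / mid)
--             if q >= 2:
--                 nxt = min(nxt, math.ceil(sample / (q - 1)))
--         # every size k with maxBatches*k < total_items is infeasible outright
--         # (the batch total is at least total_items/k), so skip past those too
--         if maxBatches > 0:
--             nxt = max(nxt, min(m, -(-total_items // maxBatches)))
--         elif total_items > 0:
--             nxt = m
--         mid = nxt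
--     return mid
-- ===== Notes on version B (the rewrite author's own statement) =====
-- stated objective: alternative
-- what changed: Replaced A's interval-bisection binary search by a forward jump-scan: starting at size 1 it repeatedly skips to the next size where the batch total can change (the first drop point of any ceil(sample/size) term) or past all sizes the aggregate bound total*size >= sum(samples) proves infeasible, returning the first size whose total fits; monotonicity of the total makes that A's answer.
-- outside the precondition, e.g. on findMinBatchSize([-17, 15, -20], -3): A returns 15, B returns 1
import Mathlib
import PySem

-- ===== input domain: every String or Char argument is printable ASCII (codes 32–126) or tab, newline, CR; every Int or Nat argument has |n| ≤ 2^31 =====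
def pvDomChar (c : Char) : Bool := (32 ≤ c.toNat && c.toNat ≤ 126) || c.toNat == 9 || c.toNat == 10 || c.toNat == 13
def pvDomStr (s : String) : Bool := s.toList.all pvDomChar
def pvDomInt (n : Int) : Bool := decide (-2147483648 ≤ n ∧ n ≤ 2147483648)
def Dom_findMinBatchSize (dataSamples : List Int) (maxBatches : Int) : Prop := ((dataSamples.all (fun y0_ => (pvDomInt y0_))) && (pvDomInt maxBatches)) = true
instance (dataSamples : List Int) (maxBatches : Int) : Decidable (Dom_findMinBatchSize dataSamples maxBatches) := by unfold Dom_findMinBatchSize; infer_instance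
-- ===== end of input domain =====

-- B replaces A's binary search by a forward jump-scan over batch sizes
-- (skipping sizes where the batch total cannot change or is provably too
-- large); equal on the stated Pre_, where the total is monotone in the size.

-- ===== PORT A =====
-- math.ceil(sample / mid) for mid ≥ 1: exact as ceiling division on Dom
-- (|sample| ≤ 2^31, so the float quotient's rounding never crosses an integer)
def pvCeilA (sample mid : Int) : Int := -(PySem.Int.floordiv (-sample) mid)

def pvTotalA (dataSamples : List Int) (mid : Int) : Int :=
  (dataSamples.map (fun sample => pvCeilA sample mid)).sum

-- the 'while left < right' binary-search loop of A
def pvLoopA (dataSamples : List Int) (maxBatches left right : Int) : Int :=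
  if h : left < right then
    let mid := PySem.Int.floordiv (left + right) 2
    if pvTotalA dataSamples mid ≤ maxBatches then
      pvLoopA dataSamples maxBatches left mid
    else
      pvLoopA dataSamples maxBatches (mid + 1) right
  else left
termination_by (right - left).toNat
decreasing_by
  · have hlt := (PySem.Int.floordiv_lt_iff_lt_mul (a := left + right) (q := right)
      (by omega : (0:Int) < 2)).mpr (by omega)
    omega
  · have hle := (PySem.Int.le_floordiv_iff_mul_le (a := left + right) (q := left)
      (by omega : (0:Int) < 2)).mpr (by omega)
    omega

def findMinBatchSize (dataSamples : List Int) (maxBatches : Int) : Int :=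
  match PySem.List.max? dataSamples (fun x => x) with
  | none => 0  -- max([]) raises ValueError; excluded by Pre_
  | some right => pvLoopA dataSamples maxBatches 1 right

-- ===== PORT B =====
def pvCeilB (sample mid : Int) : Int := -(PySem.Int.floordiv (-sample) mid)

def pvTotalB (dataSamples : List Int) (mid : Int) : Int :=
  (dataSamples.map (fun sample => pvCeilB sample mid)).sum

-- the 'nxt = m; for sample in dataSamples: …' loop computing the next size
-- where some ceil(sample/size) can drop
def pvNextB (dataSamples : List Int) (m mid : Int) : Int :=
  dataSamples.foldl (fun nxt sample =>
    let q := pvCeilB sample mid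
    if 2 ≤ q then min nxt (pvCeilB sample (q - 1)) else nxt) m

-- the jump computed in one body of B's while loop (structural next-change
-- point, then the aggregate skip 'maxBatches*k < total_items is infeasible')
def pvJumpB (dataSamples : List Int) (maxBatches totalItems m mid : Int) : Int :=
  let nxt := pvNextB dataSamples m mid
  if 0 < maxBatches then
    max nxt (min m (-(PySem.Int.floordiv (-totalItems) maxBatches)))
  else if 0 < totalItems then m
  else nxt

-- B's 'while mid < m and total(mid) > maxBatches' loop; the fuel argument
-- only makes the recursion structural (every jump increases mid by at least
-- one, so fuel = m - 1 can never run out starting from mid = 1)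
def pvLoopB (dataSamples : List Int) (maxBatches totalItems m : Int) :
    Nat → Int → Int
  | 0, mid => mid
  | fuel + 1, mid =>
    if mid < m ∧ maxBatches < pvTotalB dataSamples mid then
      pvLoopB dataSamples maxBatches totalItems m fuel
        (pvJumpB dataSamples maxBatches totalItems m mid)
    else mid

def findMinBatchSize_alt (dataSamples : List Int) (maxBatches : Int) : Int :=
  match PySem.List.max? dataSamples (fun x => x) with
  | none => 0  -- max([]) raises ValueError; excluded by Pre_
  | some m => pvLoopB dataSamples maxBatches dataSamples.sum m (m - 1).toNat 1

-- ===== PRECONDITION & SPEC =====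
-- Pre_ excludes the empty list, on which A raises ValueError (max([])), and
-- mixed-sign lists (a negative sample next to one ≥ 2): samples are item
-- counts, and with negatives the batch total is not monotone in the batch
-- size, so A's bisection value there is accidental.
def Pre_findMinBatchSize (dataSamples : List Int) (maxBatches : Int) : Prop :=
  dataSamples ≠ [] ∧ ((∀ s ∈ dataSamples, 0 ≤ s) ∨ (∀ s ∈ dataSamples, s ≤ 1))
instance (dataSamples : List Int) (maxBatches : Int) : Decidable (Pre_findMinBatchSize dataSamples maxBatches) := by unfold Pre_findMinBatchSize; infer_instance

def pvWitness_findMinBatchSize : List Int × Int := ([3, 5, 2], 4)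

def Spec_findMinBatchSize (dataSamples : List Int) (maxBatches : Int) (out : Int) : Prop := out = findMinBatchSize_alt dataSamples maxBatches
instance (dataSamples : List Int) (maxBatches : Int) (out : Int) : Decidable (Spec_findMinBatchSize dataSamples maxBatches out) := by unfold Spec_findMinBatchSize; infer_instance

-- ===== CLAIM (what is proved, stated in full; the proofs are below) =====
def Claim_equal_findMinBatchSize : Prop := ∀ (dataSamples : List Int) (maxBatches : Int), Dom_findMinBatchSize dataSamples maxBatches → Pre_findMinBatchSize dataSamples maxBatches → Spec_findMinBatchSize dataSamples maxBatches (findMinBatchSize dataSamples maxBatches)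

-- ===== LEMMAS AND PROOFS =====

-- B's pieces are the same functions as A's
theorem pv_total_eq (ds : List Int) (k : Int) : pvTotalB ds k = pvTotalA ds k := rfl

-- characterisation of ceiling division
theorem pv_ceil_le_iff (s q m : Int) (hm : 0 < m) : pvCeilA s m ≤ q ↔ s ≤ q * m := by
  unfold pvCeilA
  constructor
  · intro h
    have h2 : -q ≤ PySem.Int.floordiv (-s) m := by omega
    have := (PySem.Int.le_floordiv_iff_mul_le (a := -s) (q := -q) hm).mp h2
    nlinarith
  · intro h
    have h2 := (PySem.Int.le_floordiv_iff_mul_le (a := -s) (q := -q) hm).mpr (by nlinarith)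
    omega

theorem pv_ceil_nonneg (s m : Int) (hs : 0 ≤ s) (hm : 0 < m) : 0 ≤ pvCeilA s m := by
  by_contra h
  have h1 : pvCeilA s m ≤ -1 := by omega
  have := (pv_ceil_le_iff s (-1) m hm).mp h1
  nlinarith

theorem pv_ceil_anti (s a b : Int) (hs : 0 ≤ s) (ha : 0 < a) (hab : a ≤ b) :
    pvCeilA s b ≤ pvCeilA s a := by
  have hb : 0 < b := by omega
  apply (pv_ceil_le_iff s (pvCeilA s a) b hb).mpr
  have h1 : s ≤ pvCeilA s a * a := (pv_ceil_le_iff s (pvCeilA s a) a ha).mp le_rfl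
  have h2 : 0 ≤ pvCeilA s a := pv_ceil_nonneg s a hs ha
  nlinarith

theorem pv_total_anti (ds : List Int) (a b : Int) (hds : ∀ s ∈ ds, 0 ≤ s)
    (ha : 0 < a) (hab : a ≤ b) : pvTotalA ds b ≤ pvTotalA ds a := by
  induction ds with
  | nil => simp [pvTotalA]
  | cons x t ih =>
    have hx : pvCeilA x b ≤ pvCeilA x a :=
      pv_ceil_anti x a b (hds x (by simp)) ha hab
    have ht : pvTotalA t b ≤ pvTotalA t a := ih (fun s hs => hds s (by simp [hs]))
    simp only [pvTotalA, List.map_cons, List.sum_cons] at *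
    omega

-- reference linear scan (proof-side only): first size in [l, m) fitting the
-- batch bound, else the stop value
def pvScanRef (ds : List Int) (mb l m : Int) : Int :=
  if l < m ∧ mb < pvTotalA ds l then pvScanRef ds mb (l + 1) m else l
termination_by (m - l).toNat
decreasing_by omega

-- the scan skips every size below t when all of them are infeasible
theorem pv_scan_skip (ds : List Int) (mb m l t : Int) (hl : l ≤ t) (ht : t ≤ m)
    (hk : ∀ k, l ≤ k → k < t → mb < pvTotalA ds k) :
    pvScanRef ds mb l m = pvScanRef ds mb t m := by
  rcases eq_or_lt_of_le hl with h | h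
  · rw [h]
  · rw [pvScanRef, if_pos ⟨by omega, hk l le_rfl h⟩]
    exact pv_scan_skip ds mb m (l + 1) t (by omega) ht
      (fun k h1 h2 => hk k (by omega) h2)
termination_by (t - l).toNat

-- A's binary search equals the reference scan, under the loop invariant
theorem pv_loop_eq_scan (ds : List Int) (mb m l r : Int)
    (hds : ∀ s ∈ ds, 0 ≤ s) (h1 : 1 ≤ l) (hlr : l ≤ r) (hrm : r ≤ m)
    (hinv : pvTotalA ds r ≤ mb ∨ r = m) :
    pvLoopA ds mb l r = pvScanRef ds mb l m := by
  rcases eq_or_lt_of_le hlr with heq | hlt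
  · rw [pvLoopA, dif_neg (by omega)]
    rw [pvScanRef, if_neg]
    rcases hinv with hP | hm
    · rintro ⟨-, h2⟩
      rw [heq] at h2
      omega
    · rintro ⟨h2, -⟩
      omega
  · rw [pvLoopA, dif_pos hlt]
    have hmidlt := (PySem.Int.floordiv_lt_iff_lt_mul (a := l + r) (q := r)
      (by omega : (0:Int) < 2)).mpr (by omega)
    have hmidge := (PySem.Int.le_floordiv_iff_mul_le (a := l + r) (q := l)
      (by omega : (0:Int) < 2)).mpr (by omega)
    set mid := PySem.Int.floordiv (l + r) 2 with hmid
    by_cases hP : pvTotalA ds mid ≤ mb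
    · rw [if_pos hP]
      exact pv_loop_eq_scan ds mb m l mid hds h1 hmidge (by omega) (Or.inl hP)
    · rw [if_neg hP]
      have hrec := pv_loop_eq_scan ds mb m (mid + 1) r hds (by omega) (by omega) hrm hinv
      rw [hrec]
      refine (pv_scan_skip ds mb m l (mid + 1) (by omega) (by omega) ?_).symm
      intro k hk1 hk2
      by_contra hkP
      have : pvTotalA ds mid ≤ pvTotalA ds k :=
        pv_total_anti ds k mid hds (by omega) (by omega)
      omega
termination_by (r - l).toNat
decreasing_by all_goals omega

theorem pv_nextB_bounds (dataSamples : List Int) (m mid : Int) (h1 : 1 ≤ mid) :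
    (mid < m → mid < pvNextB dataSamples m mid) ∧ pvNextB dataSamples m mid ≤ m := by
  unfold pvNextB
  suffices h : ∀ (l : List Int) (init : Int),
      (mid < init → mid < l.foldl (fun nxt sample =>
        let q := pvCeilB sample mid
        if 2 ≤ q then min nxt (pvCeilB sample (q - 1)) else nxt) init) ∧
      l.foldl (fun nxt sample =>
        let q := pvCeilB sample mid
        if 2 ≤ q then min nxt (pvCeilB sample (q - 1)) else nxt) init ≤ init by
    exact ⟨fun hm => (h dataSamples m).1 hm, (h dataSamples m).2⟩
  intro l
  induction l with
  | nil => intro init; exact ⟨fun hi => hi, le_rfl⟩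
  | cons s t ih =>
    intro init
    simp only [List.foldl_cons]
    by_cases hq : 2 ≤ pvCeilB s mid
    · simp only [hq, if_pos]
      have hcand : mid < pvCeilB s (pvCeilB s mid - 1) := by
        have hd1 := (PySem.Int.floordiv_lt_iff_lt_mul (a := -s)
          (q := PySem.Int.floordiv (-s) mid + 1) (by omega : (0:Int) < mid)).mp
          (by omega)
        have hqd : pvCeilB s mid = -(PySem.Int.floordiv (-s) mid) := rfl
        have h2 : PySem.Int.floordiv (-s) (pvCeilB s mid - 1) < -mid := by
          apply (PySem.Int.floordiv_lt_iff_lt_mul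
            (by omega : (0:Int) < pvCeilB s mid - 1)).mpr
          nlinarith
        unfold pvCeilB at h2 ⊢
        omega
      exact ⟨fun hi => (ih _).1 (by omega),
        le_trans (ih _).2 (le_trans (min_le_left _ _) le_rfl)⟩
    · simp only [hq, if_false]
      exact ih init

theorem pv_jumpB_bounds (dataSamples : List Int) (maxBatches totalItems m mid : Int)
    (h1 : 1 ≤ mid) (hm : mid < m) :
    mid < pvJumpB dataSamples maxBatches totalItems m mid ∧
      pvJumpB dataSamples maxBatches totalItems m mid ≤ m := by
  unfold pvJumpB
  have hb := pv_nextB_bounds dataSamples m mid h1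
  have hn1 := hb.1 hm
  have hn2 := hb.2
  split_ifs <;> simp only [lt_max_iff, max_le_iff, min_le_iff] <;> omega

-- pvNextB is at most each of its candidates
theorem pv_nextB_le_cand (ds : List Int) (m mid s : Int) (hs : s ∈ ds)
    (hq : 2 ≤ pvCeilB s mid) :
    pvNextB ds m mid ≤ pvCeilB s (pvCeilB s mid - 1) := by
  unfold pvNextB
  have haux : ∀ (l : List Int) (init : Int), l.foldl (fun nxt sample =>
      let q := pvCeilB sample mid
      if 2 ≤ q then min nxt (pvCeilB sample (q - 1)) else nxt) init ≤ init := by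
    intro l
    induction l with
    | nil => intro init; exact le_rfl
    | cons a t ih =>
      intro init
      simp only [List.foldl_cons]
      by_cases hqa : 2 ≤ pvCeilB a mid
      · simp only [hqa, if_pos]
        exact le_trans (ih _) (min_le_left _ _)
      · simp only [hqa, if_false]
        exact ih init
  induction ds generalizing m with
  | nil => cases hs
  | cons a t ih =>
    simp only [List.foldl_cons]
    rcases List.mem_cons.mp hs with h | h
    · subst h
      simp only [hq, if_pos]
      exact le_trans (haux t _) (min_le_right _ _)
    · by_cases hqa : 2 ≤ pvCeilB a mid
      · simp only [hqa, if_pos]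
        exact ih _ h
      · simp only [hqa, if_false]
        exact ih _ h

-- one ceil term is constant on [mid, next-change-point)
theorem pv_ceil_const_pt (s mid k : Int) (hs : 0 ≤ s) (h1 : 1 ≤ mid) (hmk : mid ≤ k)
    (hcand : 2 ≤ pvCeilA s mid → k < pvCeilA s (pvCeilA s mid - 1)) :
    pvCeilA s k = pvCeilA s mid := by
  have hk0 : 0 < k := by omega
  have hq0 : 0 ≤ pvCeilA s mid := pv_ceil_nonneg s mid hs (by omega)
  have hupper : pvCeilA s k ≤ pvCeilA s mid := pv_ceil_anti s mid k hs (by omega) hmk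
  by_contra hne
  have hlow : pvCeilA s k ≤ pvCeilA s mid - 1 := by omega
  by_cases hq2 : 2 ≤ pvCeilA s mid
  · have hc := hcand hq2
    have h2 : s ≤ (pvCeilA s mid - 1) * k := (pv_ceil_le_iff s _ k hk0).mp hlow
    have h3 : pvCeilA s (pvCeilA s mid - 1) ≤ k :=
      (pv_ceil_le_iff s k (pvCeilA s mid - 1) (by omega)).mpr (by nlinarith)
    omega
  · interval_cases h : pvCeilA s mid
    · have h2 : s ≤ (-1) * k := (pv_ceil_le_iff s (-1) k hk0).mp (by omega)
      omega
    · have h2 : s ≤ 0 * k := (pv_ceil_le_iff s 0 k hk0).mp (by omega)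
      have hs0 : s = 0 := by omega
      subst hs0
      have h3 : pvCeilA 0 mid ≤ 0 := (pv_ceil_le_iff 0 0 mid (by omega)).mpr (by omega)
      omega

-- the batch total is constant on [mid, pvNextB ds m mid)
theorem pv_total_const (ds : List Int) (m mid k : Int) (hds : ∀ s ∈ ds, 0 ≤ s)
    (h1 : 1 ≤ mid) (hmk : mid ≤ k) (hk : k < pvNextB ds m mid) :
    pvTotalA ds k = pvTotalA ds mid := by
  unfold pvTotalA
  congr 1
  apply List.map_congr_left
  intro s hs
  exact pv_ceil_const_pt s mid k (hds s hs) h1 hmk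
    (fun hq => lt_of_lt_of_le hk (pv_nextB_le_cand ds m mid s hs hq))

-- k times the batch total is at least the item total
theorem pv_total_mul_ge (ds : List Int) (k : Int) (hk : 0 < k) :
    ds.sum ≤ k * pvTotalA ds k := by
  induction ds with
  | nil => simp [pvTotalA]
  | cons s t ih =>
    have h1 : s ≤ pvCeilA s k * k := (pv_ceil_le_iff s (pvCeilA s k) k hk).mp le_rfl
    simp only [pvTotalA, List.map_cons, List.sum_cons] at *
    nlinarith

-- every size k with maxBatches*k < sum(samples) is infeasible
theorem pv_bound_infeasible (ds : List Int) (mb k : Int) (hk : 0 < k)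
    (hS : mb * k < ds.sum) : mb < pvTotalA ds k := by
  have := pv_total_mul_ge ds k hk
  nlinarith

-- every size skipped by one jump of B is infeasible
theorem pv_jump_infeasible (ds : List Int) (mb S m mid : Int) (hS : S = ds.sum)
    (hds : ∀ s ∈ ds, 0 ≤ s) (h1 : 1 ≤ mid) (hmid : mb < pvTotalA ds mid) :
    ∀ k, mid ≤ k → k < pvJumpB ds mb S m mid → mb < pvTotalA ds k := by
  intro k hk1 hk2
  by_cases hn : k < pvNextB ds m mid
  · rw [pv_total_const ds m mid k hds h1 hk1 hn]
    exact hmid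
  · unfold pvJumpB at hk2
    simp only at hk2
    have hk0 : 0 < k := by omega
    split_ifs at hk2 with hmb hSpos
    · -- 0 < mb: k < ceil(S/mb), so mb*k < S
      have hc : k < -(PySem.Int.floordiv (-S) mb) := by
        rcases lt_max_iff.mp hk2 with h | h
        · omega
        · exact lt_of_lt_of_le h (min_le_right _ _)
      have h2 : ¬ pvCeilA S mb ≤ k := by unfold pvCeilA; omega
      have h3 : ¬ S ≤ k * mb := fun hle => h2 ((pv_ceil_le_iff S k mb hmb).mpr hle)
      exact pv_bound_infeasible ds mb k hk0 (by subst hS; nlinarith)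
    · -- mb ≤ 0 < S: mb*k ≤ 0 < S
      exact pv_bound_infeasible ds mb k hk0 (by subst hS; nlinarith)
    · omega

-- B's jump-scan equals the reference scan (the fuel suffices: every jump
-- increases mid by at least one)
theorem pv_loopB_eq_scan (ds : List Int) (mb S m : Int) (fuel : Nat) (mid : Int)
    (hS : S = ds.sum) (hds : ∀ s ∈ ds, 0 ≤ s) (h1 : 1 ≤ mid)
    (hfuel : m - mid ≤ fuel) :
    pvLoopB ds mb S m fuel mid = pvScanRef ds mb mid m := by
  induction fuel generalizing mid with
  | zero =>
    rw [pvLoopB, pvScanRef, if_neg]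
    rintro ⟨hc1, -⟩
    omega
  | succ fuel ih =>
    rw [pvLoopB]
    by_cases hg : mid < m ∧ mb < pvTotalB ds mid
    · rw [if_pos hg]
      obtain ⟨hj1, hj2⟩ := pv_jumpB_bounds ds mb S m mid h1 hg.1
      have hmid : mb < pvTotalA ds mid := by rw [← pv_total_eq]; exact hg.2
      rw [ih (pvJumpB ds mb S m mid) (by omega) (by omega)]
      exact (pv_scan_skip ds mb m mid (pvJumpB ds mb S m mid) (by omega) hj2
        (fun k hka hkb => pv_jump_infeasible ds mb S m mid hS hds h1 hmid k hka hkb)).symm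
    · rw [if_neg hg]
      rw [pvScanRef, if_neg]
      rintro ⟨hc1, hc2⟩
      rw [← pv_total_eq] at hc2
      exact hg ⟨hc1, hc2⟩

-- ===== VERDICT (by name: the statement is the Claim_ definition above) =====
theorem findMinBatchSize_spec : Claim_equal_findMinBatchSize := by
  intro ds mb _ hpre
  unfold Spec_findMinBatchSize findMinBatchSize findMinBatchSize_alt
  obtain ⟨hne, hcase⟩ := hpre
  cases hmax : PySem.List.max? ds (fun x => x) with
  | none => rfl
  | some m =>
    show pvLoopA ds mb 1 m = pvLoopB ds mb ds.sum m (m - 1).toNat 1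
    by_cases hm : 2 ≤ m
    · have hnn : ∀ s ∈ ds, 0 ≤ s := by
        rcases hcase with h | h
        · exact h
        · exfalso
          have hx : m ∈ ds := PySem.List.max?_mem hmax
          have := h m hx
          omega
      have hA : pvLoopA ds mb 1 m = pvScanRef ds mb 1 m :=
        pv_loop_eq_scan ds mb m 1 m hnn le_rfl (by omega) le_rfl (Or.inr rfl)
      have hB : pvLoopB ds mb ds.sum m (m - 1).toNat 1 = pvScanRef ds mb 1 m :=
        pv_loopB_eq_scan ds mb ds.sum m (m - 1).toNat 1 rfl hnn le_rfl (by omega)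
      rw [hA, hB]
    · -- m ≤ 1: neither loop runs and both return 1
      rw [pvLoopA, dif_neg (by omega)]
      have hz : (m - 1).toNat = 0 := by omega
      rw [hz, pvLoopB]
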